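-- pv_equiv track=rewrite | github.com/de-Boer-Lab/GIL | GIL/pipeline_components.py | filter_homopolymer
-- ===== SOURCE A (Python) =====
-- def filter_homopolymer(seqs, max_repeat):
--     '''
--     Given a list of sequences, returns all sequences without homopolymer repeats greater than a specified length.
--
--         Parameters:
--             seqs (list of str): A list of DNA sequences.
--             max_repeat (int): Maximum length of homopolymer repeat to retain.
--
--         Returns:
--             passed (list of str): All sequences in seqs that contain homopolymer repeats of length
--                                   no larger than max_repeat.
--     '''
--     if max_repeat < 1:
--         raise ValueError("max_repeat must be >= 1")
--     passed = []
--     for seq in seqs: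
--         found_homopolymer = False
--         for i in range(len(seq) - max_repeat):
--             if len(set(seq[i:i + max_repeat + 1])) == 1:
--                 found_homopolymer = True
--         if not found_homopolymer:
--             passed.append(seq)
--     return passed
-- ===== SOURCE B (Python) =====
-- def filter_homopolymer(seqs, max_repeat):
--     '''
--     Given a list of sequences, returns all sequences without homopolymer repeats greater than a specified length.
--     '''
--     if max_repeat < 1:
--         raise ValueError("max_repeat must be >= 1")
--     return [seq for seq in seqs if _max_run(seq) <= max_repeat]
--
--
-- def _max_run(seq):
--     # longest run of consecutive equal characters, found by skipping run to run
--     best = 0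
--     i = 0
--     n = len(seq)
--     while i < n:
--         j = i + 1
--         while j < n and seq[j] == seq[i]:
--             j += 1
--         if j - i > best:
--             best = j - i
--         i = j
--     return best
-- ===== Notes on version B (the rewrite author's own statement) =====
-- stated objective: alternative
-- what changed: Replaces the per-position sliding-window set() test with a single run-length scan per sequence (skip from run to run, track the longest run) and keeps a sequence iff its longest run is at most max_repeat.
import Mathlib
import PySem

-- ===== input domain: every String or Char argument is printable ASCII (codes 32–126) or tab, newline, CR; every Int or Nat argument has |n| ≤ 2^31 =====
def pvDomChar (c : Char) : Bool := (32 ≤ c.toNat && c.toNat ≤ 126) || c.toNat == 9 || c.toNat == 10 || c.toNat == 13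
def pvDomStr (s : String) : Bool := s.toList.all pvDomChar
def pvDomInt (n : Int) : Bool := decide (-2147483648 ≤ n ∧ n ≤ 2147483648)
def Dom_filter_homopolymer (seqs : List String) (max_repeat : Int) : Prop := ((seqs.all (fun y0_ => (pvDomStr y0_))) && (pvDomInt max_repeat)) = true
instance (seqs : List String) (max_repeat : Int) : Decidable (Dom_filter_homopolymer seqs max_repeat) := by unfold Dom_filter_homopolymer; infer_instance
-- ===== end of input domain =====

-- B replaces A's per-window set() scan by a single run-length pass per sequence (keep a sequence iff its longest run of equal characters is at most max_repeat).

-- ===== PORT A =====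
-- inner loop: for i in range(len(seq) - max_repeat): if len(set(seq[i:i+max_repeat+1])) == 1: found = True
def pvFoundHomopolymer (max_repeat : Int) (seq : String) : Bool :=
  (PySem.List.pyRange 0 (PySem.Str.len seq - max_repeat) 1).foldl
    (fun found i =>
      if (PySem.Set.ofList (PySem.Str.slice seq (some i) (some (i + max_repeat + 1))).toList).length = 1
      then true else found)
    false

def filter_homopolymer (seqs : List String) (max_repeat : Int) : List String :=
  -- 'if max_repeat < 1: raise ValueError' is excluded by Pre_filter_homopolymer
  seqs.foldl
    (fun passed seq => if !pvFoundHomopolymer max_repeat seq then passed ++ [seq] else passed)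
    []

-- ===== PORT B =====
-- _max_run: outer while skips from run to run (inner while = takeWhile/dropWhile of the equal block), tracking the best
def pvMaxRun : List Char → Nat
  | [] => 0
  | c :: rest =>
    max (1 + (rest.takeWhile (fun x => x == c)).length)
        (pvMaxRun (rest.dropWhile (fun x => x == c)))
termination_by cs => cs.length
decreasing_by
  simp only [List.length_cons]
  have := List.length_dropWhile_le (fun x => x == c) rest
  omega

def filter_homopolymer_alt (seqs : List String) (max_repeat : Int) : List String :=
  -- 'if max_repeat < 1: raise ValueError' is excluded by Pre_filter_homopolymer
  seqs.filter (fun seq => decide ((pvMaxRun seq.toList : Int) ≤ max_repeat))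

-- ===== PRECONDITION & SPEC =====
-- Pre_ excludes exactly max_repeat < 1, where the Python raises ValueError.
def Pre_filter_homopolymer (seqs : List String) (max_repeat : Int) : Prop := 1 ≤ max_repeat
instance (seqs : List String) (max_repeat : Int) : Decidable (Pre_filter_homopolymer seqs max_repeat) := by unfold Pre_filter_homopolymer; infer_instance
def pvWitness_filter_homopolymer : List String × Int := (["ACGT", "AAAT", "TTA"], 2)

def Spec_filter_homopolymer (seqs : List String) (max_repeat : Int) (out : List String) : Prop := out = filter_homopolymer_alt seqs max_repeat
instance (seqs : List String) (max_repeat : Int) (out : List String) : Decidable (Spec_filter_homopolymer seqs max_repeat out) := by unfold Spec_filter_homopolymer; infer_instance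

-- ===== CLAIM (what is proved, stated in full; the proofs are below) =====
def Claim_equal_filter_homopolymer : Prop := ∀ (seqs : List String) (max_repeat : Int), Dom_filter_homopolymer seqs max_repeat → Pre_filter_homopolymer seqs max_repeat → Spec_filter_homopolymer seqs max_repeat (filter_homopolymer seqs max_repeat)

-- ===== LEMMAS AND PROOFS =====

-- "some window of length k+1 starting inside cs is constant": the index form A's test reduces to
def pvHB (k : Nat) (cs : List Char) : Prop :=
  ∃ n : Nat, n + k < cs.length ∧ ∀ j : Nat, j ≤ k → cs[n + j]? = cs[n]?

-- a nonempty list has a one-element set exactly when all its members equal its head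
lemma pvSet_len_one_iff (w : List Char) (hw : w ≠ []) :
    (PySem.Set.ofList w).length = 1 ↔ ∀ x ∈ w, x = w.head hw := by
  constructor
  · intro h x hx
    obtain ⟨a, ha⟩ := List.length_eq_one_iff.mp h
    have h1 : x ∈ PySem.Set.ofList w := (PySem.Set.mem_ofList w x).mpr hx
    have h2 : w.head hw ∈ PySem.Set.ofList w := (PySem.Set.mem_ofList w _).mpr (List.head_mem hw)
    rw [ha] at h1 h2
    simp at h1 h2
    exact h1.trans h2.symm
  · intro h
    have hmem : w.head hw ∈ PySem.Set.ofList w := (PySem.Set.mem_ofList w _).mpr (List.head_mem hw)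
    have hnd := PySem.Set.nodup_ofList w
    rcases hs : PySem.Set.ofList w with _ | ⟨a, _ | ⟨b, t⟩⟩
    · rw [hs] at hmem; simp at hmem
    · rfl
    · rw [hs] at hnd
      have ha : a ∈ w := (PySem.Set.mem_ofList w a).mp (by rw [hs]; simp)
      have hb : b ∈ w := (PySem.Set.mem_ofList w b).mp (by rw [hs]; simp)
      have e1 := h a ha; have e2 := h b hb
      simp at hnd
      exact absurd (e1.trans e2.symm) hnd.1.1

lemma pvFoldl_if_true {α : Type} (p : α → Prop) [DecidablePred p] (l : List α) (b : Bool) :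
    l.foldl (fun acc x => if p x then true else acc) b = (b || l.any (fun x => decide (p x))) := by
  induction l generalizing b with
  | nil => simp
  | cons x t ih =>
    simp only [List.foldl_cons, List.any_cons, ih]
    by_cases h : p x <;> simp [h]

lemma pvWindow_iff (cs : List Char) (n k : Nat) (hlt : n + k < cs.length)
    (hne : List.take (k+1) (List.drop n cs) ≠ []) :
    (∀ x ∈ List.take (k+1) (List.drop n cs), x = (List.take (k+1) (List.drop n cs)).head hne)
      ↔ (∀ j : Nat, j ≤ k → cs[n + j]? = cs[n]?) := by
  have hwlen : (List.take (k+1) (List.drop n cs)).length = k + 1 := by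
    simp [List.length_take, List.length_drop]; omega
  have hwget : ∀ (j : Nat) (hj : j < k + 1),
      (List.take (k+1) (List.drop n cs))[j]'(by omega) = cs[n + j]'(by omega) := by
    intro j hj
    simp [List.getElem_take, List.getElem_drop]
  have hhead : (List.take (k+1) (List.drop n cs)).head hne = cs[n]'(by omega) := by
    rw [List.head_eq_getElem]
    have := hwget 0 (by omega)
    simpa using this
  constructor
  · intro h j hj
    have hx : cs[n + j]'(by omega) ∈ List.take (k+1) (List.drop n cs) := by
      rw [← hwget j (by omega)]; exact List.getElem_mem _
    have := h _ hx
    rw [List.getElem?_eq_getElem (by omega), List.getElem?_eq_getElem (by omega)]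
    simp [this, hhead]
  · intro h x hx
    obtain ⟨j, hj, rfl⟩ := List.mem_iff_getElem.mp hx
    rw [hwlen] at hj
    rw [hwget j hj, hhead]
    have := h j (by omega)
    rw [List.getElem?_eq_getElem (by omega), List.getElem?_eq_getElem (by omega)] at this
    simpa using this

lemma pvFound_iff (k : Nat) (hk : 1 ≤ k) (s : String) :
    pvFoundHomopolymer (k : Int) s = true ↔ pvHB k s.toList := by
  unfold pvFoundHomopolymer
  rw [pvFoldl_if_true]
  simp only [Bool.false_or, List.any_eq_true]
  constructor
  · rintro ⟨i, hmem, hp⟩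
    rw [PySem.List.mem_pyRange_one] at hmem
    rw [PySem.Str.len_eq] at hmem
    obtain ⟨n, rfl⟩ : ∃ n : Nat, i = (n : Int) := ⟨i.toNat, by omega⟩
    have hlt : n + k < s.toList.length := by omega
    have hsl : (PySem.Str.slice s (some (n : Int)) (some ((n : Int) + (k : Int) + 1))).toList
        = List.take (k+1) (List.drop n s.toList) := by
      have hb : (PySem.Str.slice s (some (n : Int)) (some ((n : Int) + (k : Int) + 1))).toList
          = PySem.List.slice s.toList (some (n : Int)) (some ((n : Int) + (k : Int) + 1)) := by
        simp [PySem.Str.slice]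
      rw [hb, show (n : Int) + (k : Int) + 1 = (n : Int) + ((k + 1 : Nat) : Int) by push_cast; ring,
        PySem.List.slice_natCast_add]
    rw [hsl] at hp
    simp only [decide_eq_true_eq] at hp
    have hne : List.take (k+1) (List.drop n s.toList) ≠ [] := by
      apply List.ne_nil_of_length_pos
      rw [List.length_take, List.length_drop]
      omega
    exact ⟨n, hlt, (pvWindow_iff s.toList n k hlt hne).mp ((pvSet_len_one_iff _ hne).mp hp)⟩
  · rintro ⟨n, hlt, hall⟩
    refine ⟨(n : Int), ?_, ?_⟩
    · rw [PySem.List.mem_pyRange_one, PySem.Str.len_eq]; omega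
    · have hsl : (PySem.Str.slice s (some (n : Int)) (some ((n : Int) + (k : Int) + 1))).toList
          = List.take (k+1) (List.drop n s.toList) := by
        have hb : (PySem.Str.slice s (some (n : Int)) (some ((n : Int) + (k : Int) + 1))).toList
            = PySem.List.slice s.toList (some (n : Int)) (some ((n : Int) + (k : Int) + 1)) := by
          simp [PySem.Str.slice]
        rw [hb, show (n : Int) + (k : Int) + 1 = (n : Int) + ((k + 1 : Nat) : Int) by push_cast; ring,
          PySem.List.slice_natCast_add]
      rw [hsl]
      have hne : List.take (k+1) (List.drop n s.toList) ≠ [] := by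
        apply List.ne_nil_of_length_pos
        rw [List.length_take, List.length_drop]
        omega
      simp only [decide_eq_true_eq]
      exact (pvSet_len_one_iff _ hne).mpr ((pvWindow_iff s.toList n k hlt hne).mpr hall)

lemma pvHB_front (k : Nat) (c : Char) (cs : List Char) :
    pvHB k (List.replicate (k + 1) c ++ cs) := by
  refine ⟨0, by simp only [List.length_append, List.length_replicate]; omega, ?_⟩
  intro j hj
  rw [List.getElem?_append_left (by simp only [List.length_replicate]; omega),
      List.getElem?_append_left (by simp only [List.length_replicate]; omega)]
  simp [List.getElem?_replicate, Nat.lt_succ_of_le hj]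

lemma pvHB_append_left (k : Nat) (p l : List Char) (h : pvHB k l) : pvHB k (p ++ l) := by
  obtain ⟨n, hlt, hall⟩ := h
  refine ⟨p.length + n, by simp only [List.length_append]; omega, ?_⟩
  intro j hj
  rw [List.getElem?_append_right (by omega), List.getElem?_append_right (by omega)]
  rw [show p.length + n + j - p.length = n + j by omega, show p.length + n - p.length = n by omega]
  exact hall j hj

-- A's window condition is "some character's (k+1)-fold repeat occurs in the string"
lemma pvHB_iff_repl (k : Nat) (cs : List Char) :
    pvHB k cs ↔ ∃ c, List.replicate (k + 1) c <:+: cs := by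
  constructor
  · rintro ⟨n, hlt, hall⟩
    have hne : List.take (k+1) (List.drop n cs) ≠ [] := by
      apply List.ne_nil_of_length_pos
      rw [List.length_take, List.length_drop]
      omega
    have hwin := (pvWindow_iff cs n k hlt hne).mpr hall
    have hinfix : List.take (k+1) (List.drop n cs) <:+: cs :=
      (List.take_prefix _ _).isInfix.trans (List.drop_suffix _ _).isInfix
    have hwrep : List.take (k+1) (List.drop n cs)
        = List.replicate (k+1) ((List.take (k+1) (List.drop n cs)).head hne) := by
      rw [List.eq_replicate_iff]
      exact ⟨by rw [List.length_take, List.length_drop]; omega, hwin⟩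
    exact ⟨_, hwrep ▸ hinfix⟩
  · rintro ⟨c, p, s, hpt⟩
    rw [← hpt, List.append_assoc]
    exact pvHB_append_left k p _ (pvHB_front k c s)

-- B's longest-run value exceeds k exactly when some character's (k+1)-fold repeat occurs
lemma pvMaxRun_gt_iff : ∀ (cs : List Char) (k : Nat),
    k < pvMaxRun cs ↔ ∃ c, List.replicate (k + 1) c <:+: cs := by
  intro cs
  induction cs using pvMaxRun.induct with
  | case1 =>
    intro k
    simp [pvMaxRun]
  | case2 c rest ih =>
    intro k
    rw [pvMaxRun]
    set t := rest.takeWhile (fun x => x == c) with ht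
    set d := rest.dropWhile (fun x => x == c) with hd
    set m := t.length with hm
    have htrep : t = List.replicate m c := by
      rw [List.eq_replicate_iff]
      refine ⟨rfl, fun x hx => ?_⟩
      have := List.mem_takeWhile_imp hx
      simpa using this
    have hsplit : c :: rest = List.replicate (m + 1) c ++ d := by
      rw [List.replicate_succ, List.cons_append, ← htrep, List.takeWhile_append_dropWhile]
    have hdhead : ∀ (h : d ≠ []), d.head h ≠ c := by
      intro h hc
      have := List.head_dropWhile_not (fun x => x == c) h
      simp at this
      exact this hc
    rw [hsplit]
    constructor
    · intro hlt
      rcases lt_max_iff.mp hlt with hk1 | hkd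
      · refine ⟨c, [], List.replicate (m - k) c ++ d, ?_⟩
        rw [List.nil_append, ← List.append_assoc, ← List.replicate_add]
        congr 2
        omega
      · obtain ⟨c', hinf⟩ := (ih k).mp hkd
        exact ⟨c', hinf.trans (List.suffix_append _ _).isInfix⟩
    · rintro ⟨c', p, s, hpt⟩
      have hlen := congrArg List.length hpt
      simp only [List.length_append, List.length_replicate] at hlen
      have hpt' : p ++ (List.replicate (k+1) c' ++ s) = List.replicate (m + 1) c ++ d := by
        rw [← List.append_assoc]; exact hpt
      rcases Nat.lt_or_ge p.length m.succ with hi | hi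
      · -- occurrence starts inside the leading run
        have hc' : c' = c := by
          have h1 : (p ++ (List.replicate (k+1) c' ++ s))[p.length]? = some c' := by
            rw [List.getElem?_append_right (le_refl _)]
            simp
          rw [hpt'] at h1
          rw [List.getElem?_append_left (by simpa using hi), List.getElem?_replicate_of_lt hi] at h1
          exact (Option.some_inj.mp h1).symm
        rcases Nat.lt_or_ge (p.length + k) (m + 1) with hj | hj
        · exact lt_max_of_lt_left (by omega)
        · -- the repeat would cover d's head, contradicting dropWhile
          exfalso
          have hdne : d ≠ [] := by
            intro h
            rw [h] at hlen
            simp at hlen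
            omega
          have h1 : (p ++ (List.replicate (k+1) c' ++ s))[m + 1]? = some c' := by
            rw [List.getElem?_append_right (by omega),
                List.getElem?_append_left (by simp; omega),
                List.getElem?_replicate_of_lt (by omega)]
          rw [hpt'] at h1
          rw [List.getElem?_append_right (by simp)] at h1
          simp only [List.length_replicate, Nat.sub_self] at h1
          rw [List.getElem?_eq_getElem (by omega : 0 < d.length)] at h1
          have : d.head hdne = c' := by
            rw [List.head_eq_getElem]
            exact Option.some_inj.mp h1
          exact hdhead hdne (hc' ▸ this)
      · -- occurrence lies entirely inside d
        apply lt_max_of_lt_right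
        apply (ih k).mpr
        refine ⟨c', List.drop (m+1) p, s, ?_⟩
        have := congrArg (List.drop (m+1)) hpt'
        rw [List.drop_append_of_le_length (by omega), List.drop_left' (by simp)] at this
        rw [← List.append_assoc] at this
        exact this

-- ===== VERDICT (by name: the statement is the Claim_ definition above) =====
theorem filter_homopolymer_spec : Claim_equal_filter_homopolymer := by
  intro seqs max_repeat _hdom hpre
  unfold Pre_filter_homopolymer at hpre
  unfold Spec_filter_homopolymer filter_homopolymer filter_homopolymer_alt
  have hfoldA := PySem.List.foldl_append_if (fun seq => !pvFoundHomopolymer max_repeat seq) id seqs []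
  simp only [id, List.nil_append, List.map_id] at hfoldA
  rw [hfoldA]
  apply List.filter_congr
  intro s _
  obtain ⟨k, hk, rfl⟩ : ∃ k : Nat, 1 ≤ k ∧ max_repeat = (k : Int) :=
    ⟨max_repeat.toNat, by omega, by omega⟩
  have hA := (pvFound_iff k hk s).trans ((pvHB_iff_repl k s.toList).trans (pvMaxRun_gt_iff s.toList k).symm)
  rcases ha : pvFoundHomopolymer (k : Int) s with _ | _
  · have hnot : ¬ k < pvMaxRun s.toList := by rw [← hA, ha]; simp
    simp only [Bool.not_false]
    symm
    rw [decide_eq_true_eq]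
    exact_mod_cast Nat.le_of_not_lt hnot
  · have hlt : k < pvMaxRun s.toList := hA.mp ha
    simp only [Bool.not_true]
    symm
    rw [decide_eq_false_iff_not]
    intro hle
    omega
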